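-- pv_equiv track=rewrite | github.com/yvasant/Dependency_Parser | nn.py | first_two_children
-- ===== SOURCE A (Python) =====
-- def get_children(parent, pdt, buffer, type='b'):
--     leftmost = 'NULL'
--     rightmost = 'NULL'
--     left_pos = 'NULL'
--     right_pos = 'NULL'
--
--     if parent in pdt:
--         left_pos = pdt.index(parent)
--         right_pos = len(pdt) - pdt[::-1].index(parent) - 1
--
--         if left_pos != parent:
--             leftmost = buffer[left_pos]
--         else:
--             left_pos = 'NULL'
--         # TODO: If rightmost == leftmost , should i handle it this way?
--         if right_pos != parent and right_pos != leftmost: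
--             rightmost = buffer[right_pos]
--         else:
--             right_pos = 'NULL'
--
--     if type == 'b':
--         return leftmost, left_pos, rightmost, right_pos
--     elif type == 'l':
--         return leftmost, left_pos
--     elif type == 'r':
--         return rightmost, right_pos
--
-- def first_two_children(x, buffer, pdt, tags, arc_tags):
--     # There probably is a nicer way of finding the two first occurances...
--     Sw, St, Sl = [], [], []
--     for elem in x:
--         i = 0
--         for word in buffer:
--             if elem == buffer.index(word) and i < 2:
--                 i += 1
--                 left_child, pos_l, right_child, pos_r = get_children(elem, pdt, buffer, 'b')
--                 Sw.extend([left_child, right_child])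
--
--                 if pos_l == 'NULL':
--                     St.append(pos_l)
--                     Sl.append(pos_l)
--                 else:
--                     St.append(tags[pos_l])
--                     Sl.append(arc_tags[pos_l])
--
--                 if pos_r == 'NULL':
--                     St.append('NULL')
--                     Sl.append('NULL')
--                 else:
--                     St.append(tags[pos_r])
--                     Sl.append(arc_tags[pos_r])
--
--         for missing in range(i*2,4):
--             Sw.append('NULL')
--             St.append('NULL')
--             Sl.append('NULL')
--
--     return Sw, St, Sl
-- ===== SOURCE B (Python) =====
-- def first_two_children(x, buffer, pdt, tags, arc_tags):
--     # Precompute first-occurrence / count maps for buffer and first/last index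
--     # maps for pdt, then answer each elem of x in O(1) (A rescans buffer/pdt).
--     first = {}
--     for j, w in enumerate(buffer):
--         if w not in first:
--             first[w] = j
--     cnt = {}
--     for w in buffer:
--         cnt[w] = cnt.get(w, 0) + 1
--     pfirst = {}
--     for j, p in enumerate(pdt):
--         if p not in pfirst:
--             pfirst[p] = j
--     plast = {}
--     for j, p in enumerate(pdt):
--         plast[p] = j
--
--     Sw, St, Sl = [], [], []
--     for elem in x:
--         k = 0
--         if 0 <= elem < len(buffer) and first[buffer[elem]] == elem:
--             k = min(2, cnt[buffer[elem]])
--         if k: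
--             if elem in pfirst:
--                 l, r = pfirst[elem], plast[elem]
--                 lw, lt, ll = (buffer[l], tags[l], arc_tags[l]) if l != elem else ('NULL', 'NULL', 'NULL')
--                 rw, rt, rl = (buffer[r], tags[r], arc_tags[r]) if r != elem else ('NULL', 'NULL', 'NULL')
--             else:
--                 lw = lt = ll = rw = rt = rl = 'NULL'
--             Sw += [lw, rw] * k
--             St += [lt, rt] * k
--             Sl += [ll, rl] * k
--         pad = 4 - 2 * k
--         Sw += ['NULL'] * pad
--         St += ['NULL'] * pad
--         Sl += ['NULL'] * pad
--     return Sw, St, Sl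
-- ===== Notes on version B (the rewrite author's own statement) =====
-- stated objective: faster
-- what changed: B builds first-occurrence/count maps of buffer and first/last-index maps of pdt in single passes, replacing A's per-element rescan of buffer with repeated list.index calls (and per-firing pdt scans inside get_children) by O(1) dictionary lookups.
import Mathlib
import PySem

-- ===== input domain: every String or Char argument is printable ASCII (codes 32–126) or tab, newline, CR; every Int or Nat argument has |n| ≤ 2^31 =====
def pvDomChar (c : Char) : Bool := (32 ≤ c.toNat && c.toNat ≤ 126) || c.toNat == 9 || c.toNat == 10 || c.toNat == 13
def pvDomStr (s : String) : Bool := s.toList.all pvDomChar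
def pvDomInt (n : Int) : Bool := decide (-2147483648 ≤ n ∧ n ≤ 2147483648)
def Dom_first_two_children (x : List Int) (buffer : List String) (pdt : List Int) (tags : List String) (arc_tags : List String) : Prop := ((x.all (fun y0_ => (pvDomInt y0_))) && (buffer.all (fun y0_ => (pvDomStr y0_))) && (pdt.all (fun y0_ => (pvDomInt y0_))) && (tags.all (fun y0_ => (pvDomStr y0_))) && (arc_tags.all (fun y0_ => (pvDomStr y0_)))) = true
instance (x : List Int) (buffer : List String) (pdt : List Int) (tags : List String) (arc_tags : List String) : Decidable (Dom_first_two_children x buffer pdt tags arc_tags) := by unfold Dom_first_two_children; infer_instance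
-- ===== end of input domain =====

-- B replaces A's repeated buffer.index/pdt.index rescans (an O(|buffer|^2) inner loop
-- per elem of x) by first-occurrence/count/last-occurrence maps built once, answering
-- each elem in O(1); same return value on every input admitted by Pre_.

-- ===== PORT A =====
-- Port of get_children(parent, pdt, buffer, 'b') (A only calls it with type='b').
-- 'NULL' positions are none.  NOTE: Python's `right_pos != leftmost` compares an int
-- with a str and is hence always True in Python; the always-true conjunct is dropped,
-- leaving `right_pos != parent`.  buffer[pos] can raise IndexError: ported with
-- pyGetD (Pre_ excludes exactly the out-of-range positions Python would reach).
def getChildrenA (parent : Int) (pdt : List Int) (buffer : List String) :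
    String × Option Int × String × Option Int :=
  match PySem.List.index? pdt parent with
  | none => ("NULL", none, "NULL", none)          -- parent not in pdt
  | some lp =>
    let left_pos : Int := lp
    let right_pos : Int :=
      (pdt.length : Int) - (((PySem.List.index? pdt.reverse parent).getD 0 : Nat) : Int) - 1
    let lres : String × Option Int :=
      if left_pos ≠ parent then (PySem.List.pyGetD buffer left_pos "", some left_pos)
      else ("NULL", none)
    let rres : String × Option Int :=
      if right_pos ≠ parent then (PySem.List.pyGetD buffer right_pos "", some right_pos)
      else ("NULL", none)
    (lres.1, lres.2, rres.1, rres.2)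

-- the body of A's inner `for word in buffer` loop; state (i, Sw, St, Sl)

-- the body of A's inner `for word in buffer` loop; state (i, Sw, St, Sl)
def innerStepA (elem : Int) (buffer : List String) (pdt : List Int)
    (tags arc_tags : List String)
    (st : Nat × List String × List String × List String) (word : String) :
    Nat × List String × List String × List String :=
  if (PySem.List.index? buffer word).map (fun n => (n : Int)) = some elem ∧ st.1 < 2 then
    let gc := getChildrenA elem pdt buffer
    let Sw := st.2.1 ++ [gc.1, gc.2.2.1]
    let St := st.2.2.1 ++ [match gc.2.1 with | none => "NULL" | some p => PySem.List.pyGetD tags p ""]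
    let Sl := st.2.2.2 ++ [match gc.2.1 with | none => "NULL" | some p => PySem.List.pyGetD arc_tags p ""]
    let St := St ++ [match gc.2.2.2 with | none => "NULL" | some p => PySem.List.pyGetD tags p ""]
    let Sl := Sl ++ [match gc.2.2.2 with | none => "NULL" | some p => PySem.List.pyGetD arc_tags p ""]
    (st.1 + 1, Sw, St, Sl)
  else st

-- the body of A's outer `for elem in x` loop (inner loop, then the `missing` loop)

-- the body of A's outer `for elem in x` loop (the inner loop, then the `missing` loop)
def elemStepA (buffer : List String) (pdt : List Int) (tags arc_tags : List String)
    (s : List String × List String × List String) (elem : Int) :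
    List String × List String × List String :=
  let st := buffer.foldl (innerStepA elem buffer pdt tags arc_tags) (0, s.1, s.2.1, s.2.2)
  (PySem.List.pyRange ((st.1 : Int) * 2) 4 1).foldl
    (fun t _ => (t.1 ++ ["NULL"], t.2.1 ++ ["NULL"], t.2.2 ++ ["NULL"]))
    (st.2.1, st.2.2.1, st.2.2.2)


def first_two_children (x : List Int) (buffer : List String) (pdt : List Int) (tags : List String) (arc_tags : List String) : List String × List String × List String :=
  x.foldl (elemStepA buffer pdt tags arc_tags) ([], [], [])


-- ===== PORT B =====
-- first-occurrence index map:  for j, w in enumerate(l): if w not in d: d[w] = j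
def firstIdxDict {α : Type} [BEq α] (l : List α) : PySem.Dict α Int :=
  (PySem.List.enumerate l 0).foldl
    (fun d p => if d.contains p.2 then d else d.insert p.2 p.1) PySem.Dict.empty


-- last-occurrence index map:  for j, w in enumerate(l): d[w] = j
def lastIdxDict {α : Type} [BEq α] (l : List α) : PySem.Dict α Int :=
  (PySem.List.enumerate l 0).foldl (fun d p => d.insert p.2 p.1) PySem.Dict.empty


-- counts:  for w in l: d[w] = d.get(w, 0) + 1
def cntDict {α : Type} [BEq α] (l : List α) : PySem.Dict α Int :=
  l.foldl (fun d w => d.insert w (d.getD w 0 + 1)) PySem.Dict.empty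


-- the body of B's `for elem in x` loop
def elemStepB (buffer : List String) (tags arc_tags : List String)
    (first cnt : PySem.Dict String Int) (pfirst plast : PySem.Dict Int Int)
    (s : List String × List String × List String) (elem : Int) :
    List String × List String × List String :=
  let k : Nat :=
    if 0 ≤ elem ∧ elem < (buffer.length : Int) ∧
       first.get? (PySem.List.pyGetD buffer elem "") = some elem then
      min 2 (cnt.getD (PySem.List.pyGetD buffer elem "") 0).toNat
    else 0
  let blk : List String × List String × List String :=
    if k ≠ 0 then
      let f : String × String × String × String × String × String :=
        match pfirst.get? elem with
        | some l =>
          let r := (plast.get? elem).getD 0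
          let lf : String × String × String :=
            if l ≠ elem then
              (PySem.List.pyGetD buffer l "", PySem.List.pyGetD tags l "",
               PySem.List.pyGetD arc_tags l "")
            else ("NULL", "NULL", "NULL")
          let rf : String × String × String :=
            if r ≠ elem then
              (PySem.List.pyGetD buffer r "", PySem.List.pyGetD tags r "",
               PySem.List.pyGetD arc_tags r "")
            else ("NULL", "NULL", "NULL")
          (lf.1, lf.2.1, lf.2.2, rf.1, rf.2.1, rf.2.2)
        | none => ("NULL", "NULL", "NULL", "NULL", "NULL", "NULL")
      ((List.replicate k [f.1, f.2.2.2.1]).flatten,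
       (List.replicate k [f.2.1, f.2.2.2.2.1]).flatten,
       (List.replicate k [f.2.2.1, f.2.2.2.2.2]).flatten)
    else ([], [], [])
  let pad := List.replicate (4 - 2 * k) "NULL"
  (s.1 ++ blk.1 ++ pad, s.2.1 ++ blk.2.1 ++ pad, s.2.2 ++ blk.2.2 ++ pad)


def first_two_children_alt (x : List Int) (buffer : List String) (pdt : List Int) (tags : List String) (arc_tags : List String) : List String × List String × List String :=
  x.foldl
    (elemStepB buffer tags arc_tags (firstIdxDict buffer) (cntDict buffer)
      (firstIdxDict pdt) (lastIdxDict pdt))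
    ([], [], [])



-- ===== PRECONDITION & SPEC =====
-- Pre_ excludes exactly the inputs on which A raises IndexError: an elem of x that
-- fires (elem is the first-occurrence index of buffer[elem]) and occurs in pdt, whose
-- first/last pdt-index (when it differs from elem) reaches past buffer, tags or arc_tags.
def Pre_first_two_children (x : List Int) (buffer : List String) (pdt : List Int) (tags : List String) (arc_tags : List String) : Prop :=
  ∀ elem ∈ x,
    (0 ≤ elem ∧ elem < (buffer.length : Int) ∧
     PySem.List.index? buffer (PySem.List.pyGetD buffer elem "") = some elem.toNat) →
    elem ∈ pdt →
    (let l : Int := (((PySem.List.index? pdt elem).getD 0 : Nat) : Int)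
     let r : Int := (pdt.length : Int) - (((PySem.List.index? pdt.reverse elem).getD 0 : Nat) : Int) - 1
     (l ≠ elem → l < (buffer.length : Int) ∧ l < (tags.length : Int) ∧ l < (arc_tags.length : Int)) ∧
     (r ≠ elem → r < (buffer.length : Int) ∧ r < (tags.length : Int) ∧ r < (arc_tags.length : Int)))
instance (x : List Int) (buffer : List String) (pdt : List Int) (tags : List String) (arc_tags : List String) : Decidable (Pre_first_two_children x buffer pdt tags arc_tags) := by unfold Pre_first_two_children; infer_instance

def pvWitness_first_two_children : List Int × List String × List Int × List String × List String :=
  ([0, 1, -2], ["a", "a", "b"], [5, 0, 0], ["T1", "T2", "T3"], ["L1", "L2", "L3"])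

def Spec_first_two_children (x : List Int) (buffer : List String) (pdt : List Int) (tags : List String) (arc_tags : List String) (out : List String × List String × List String) : Prop := out = first_two_children_alt x buffer pdt tags arc_tags
instance (x : List Int) (buffer : List String) (pdt : List Int) (tags : List String) (arc_tags : List String) (out : List String × List String × List String) : Decidable (Spec_first_two_children x buffer pdt tags arc_tags out) := by unfold Spec_first_two_children; infer_instance

-- ===== CLAIM (what is proved, stated in full; the proofs are below) =====
def Claim_equal_first_two_children : Prop := ∀ (x : List Int) (buffer : List String) (pdt : List Int) (tags : List String) (arc_tags : List String), Dom_first_two_children x buffer pdt tags arc_tags → Pre_first_two_children x buffer pdt tags arc_tags → Spec_first_two_children x buffer pdt tags arc_tags (first_two_children x buffer pdt tags arc_tags)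

-- ===== LEMMAS AND PROOFS =====
-- lookup in the first-occurrence-map loop, with generalized start index and accumulator
theorem firstIdxDict_aux {α : Type} [BEq α] [LawfulBEq α]
    (l : List α) (s : Int) (d : PySem.Dict α Int) (v : α) :
    ((PySem.List.enumerate l s).foldl
        (fun d p => if d.contains p.2 then d else d.insert p.2 p.1) d).get? v =
      ((d.get? v).or ((PySem.List.index? l v).map (fun n => (n : Int) + s))) := by
  induction l generalizing s d with
  | nil =>
    simp [PySem.List.enumerate_nil]
  | cons a l ih =>
    rw [PySem.List.enumerate_cons]
    simp only [List.foldl_cons]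
    by_cases hv : a = v
    · subst hv
      rw [PySem.List.index?_cons_self]
      by_cases hc : d.contains a
      · simp only [hc, if_pos]
        rw [ih]
        obtain ⟨w, hw⟩ := Option.isSome_iff_exists.mp (by rw [← PySem.Dict.contains_eq_isSome_get? d a]; exact hc)
        simp [hw]
      · rw [if_neg (by simp [hc]), ih]
        have hnone : d.get? a = none := by
          rw [PySem.Dict.get?_eq_none_iff_contains]; simpa using hc
        simp [hnone, PySem.Dict.get?_insert_self]
    · rw [PySem.List.index?_cons_of_ne l hv]
      have harith : ∀ o : Option Nat,
          (o.map (fun x : Nat => x + 1)).map (fun n => (n : Int) + s) = o.map (fun n => (n : Int) + (s + 1)) := by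
        intro o
        cases o with
        | none => rfl
        | some n => simp; ring
      by_cases hc : d.contains a
      · simp only [hc, if_pos]
        rw [ih, harith]
      · rw [if_neg (by simp [hc]), ih, PySem.Dict.get?_insert_of_ne d _ (fun h => hv h.symm), harith]

-- B's first/pfirst maps answer exactly list.index
theorem firstIdxDict_get? {α : Type} [BEq α] [LawfulBEq α] (l : List α) (v : α) :
    (firstIdxDict l).get? v = (PySem.List.index? l v).map (fun n => (n : Int)) := by
  unfold firstIdxDict
  rw [firstIdxDict_aux l 0 PySem.Dict.empty v]
  simp [PySem.Dict.get?_empty]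

-- lookup in the last-occurrence-map loop, with generalized start index and accumulator
theorem lastIdxDict_aux {α : Type} [BEq α] [LawfulBEq α]
    (l : List α) (s : Int) (d : PySem.Dict α Int) (v : α) :
    ((PySem.List.enumerate l s).foldl (fun d p => d.insert p.2 p.1) d).get? v =
      (((PySem.List.index? l.reverse v).map
          (fun n => s + (l.length : Int) - (n : Int) - 1)).or (d.get? v)) := by
  induction l generalizing s d with
  | nil => simp [PySem.List.enumerate_nil]
  | cons a l ih =>
    rw [PySem.List.enumerate_cons]
    simp only [List.foldl_cons, List.reverse_cons]
    rw [ih]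
    by_cases hm : v ∈ l
    · have hmr : v ∈ l.reverse := by simpa using hm
      rw [PySem.List.index?_append_of_mem [a] hmr]
      obtain ⟨n, hn⟩ := Option.isSome_iff_exists.mp ((PySem.List.index?_isSome_iff _ _).mpr hmr)
      rw [hn]
      simp
      omega
    · have hmr : v ∉ l.reverse := by simpa using hm
      have hnone : PySem.List.index? l.reverse v = none := (PySem.List.index?_eq_none_iff _ _).mpr hmr
      rw [hnone]
      by_cases hv : v = a
      · subst hv
        rw [PySem.List.index?_append_singleton_self _ _ hmr]
        simp [PySem.Dict.get?_insert_self]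
        omega
      · have : PySem.List.index? (l.reverse ++ [a]) v = none := by
          rw [PySem.List.index?_eq_none_iff]
          simp [hmr, fun h => hv h]
        rw [this, PySem.Dict.get?_insert_of_ne d _ hv]
        simp

-- B's plast map answers exactly len(pdt) - pdt[::-1].index(v) - 1
theorem lastIdxDict_get? {α : Type} [BEq α] [LawfulBEq α] (l : List α) (v : α) :
    (lastIdxDict l).get? v =
      (PySem.List.index? l.reverse v).map (fun n => (l.length : Int) - (n : Int) - 1) := by
  unfold lastIdxDict
  rw [lastIdxDict_aux l 0 PySem.Dict.empty v]
  simp [PySem.Dict.get?_empty]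

-- B's cnt map answers exactly list.count
theorem cntDict_getD {α : Type} [BEq α] [LawfulBEq α] (l : List α) (v : α) :
    (cntDict l).getD v 0 = l.count v := by
  unfold cntDict
  rw [PySem.Dict.getD_foldl_insert_add_one]
  simp [PySem.Dict.getD_empty]

-- Port of `get_children(parent, pdt, buffer, 'b')` (A only calls it with type='b').
-- 'NULL' positions are `none`.  NOTE: Python's `right_pos != leftmost` compares an
-- int with a str and is hence always True; it is ported as the always-true `True`
-- folded away, leaving `right_pos ≠ parent`.  `buffer[pos]` can raise IndexError:
-- ported with pyGetD (Pre_ excludes out-of-range positions).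

-- boolean form of A's inner-loop test `elem == buffer.index(word)`
def firesP (buffer : List String) (elem : Int) (word : String) : Bool :=
  (PySem.List.index? buffer word).map (fun n => (n : Int)) == some elem

-- the per-firing word block A appends to Sw
def blkW (elem : Int) (pdt : List Int) (buffer : List String) : List String :=
  [(getChildrenA elem pdt buffer).1, (getChildrenA elem pdt buffer).2.2.1]

-- the per-firing block A appends to St (resp. Sl, with ts := arc_tags)
def blkT (elem : Int) (pdt : List Int) (buffer tags : List String) : List String :=
  [match (getChildrenA elem pdt buffer).2.1 with
   | none => "NULL" | some p => PySem.List.pyGetD tags p "",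
   match (getChildrenA elem pdt buffer).2.2.2 with
   | none => "NULL" | some p => PySem.List.pyGetD tags p ""]

-- boolean form of A's inner-loop test

-- A's inner loop appends the same block min(2, #firing words) times
theorem innerLoopA (elem : Int) (buffer : List String) (pdt : List Int)
    (tags arc_tags : List String) (ws : List String) (i : Nat) (hi : i ≤ 2)
    (Sw St Sl : List String) :
    ws.foldl (innerStepA elem buffer pdt tags arc_tags) (i, Sw, St, Sl) =
      (i + min (2 - i) (ws.countP (firesP buffer elem)),
       Sw ++ (List.replicate (min (2 - i) (ws.countP (firesP buffer elem))) (blkW elem pdt buffer)).flatten,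
       St ++ (List.replicate (min (2 - i) (ws.countP (firesP buffer elem))) (blkT elem pdt buffer tags)).flatten,
       Sl ++ (List.replicate (min (2 - i) (ws.countP (firesP buffer elem))) (blkT elem pdt buffer arc_tags)).flatten) := by
  induction ws generalizing i Sw St Sl with
  | nil => simp
  | cons w ws ih =>
    simp only [List.foldl_cons, List.countP_cons]
    by_cases hf : (PySem.List.index? buffer w).map (fun n => (n : Int)) = some elem
    · by_cases hlt : i < 2
      · have hfP : firesP buffer elem w = true := by unfold firesP; exact beq_iff_eq.mpr hf
        have hstep : innerStepA elem buffer pdt tags arc_tags (i, Sw, St, Sl) w =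
            (i + 1, Sw ++ blkW elem pdt buffer, St ++ blkT elem pdt buffer tags,
             Sl ++ blkT elem pdt buffer arc_tags) := by
          unfold innerStepA
          rw [if_pos ⟨hf, hlt⟩]
          simp [blkW, blkT, List.append_assoc]
        rw [hstep, ih (i + 1) (by omega)]
        have hm : min (2 - i) (ws.countP (firesP buffer elem) + 1) =
            min (2 - (i + 1)) (ws.countP (firesP buffer elem)) + 1 := by
          omega
        simp only [hfP, if_true]
        rw [hm]
        simp [List.replicate_succ, List.flatten_cons, List.append_assoc]
        omega
      · have hstep : innerStepA elem buffer pdt tags arc_tags (i, Sw, St, Sl) w = (i, Sw, St, Sl) := by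
          unfold innerStepA
          rw [if_neg (by intro h; exact hlt h.2)]
        rw [hstep, ih i hi]
        have h2 : 2 - i = 0 := by omega
        simp [h2]
    · have hstep : innerStepA elem buffer pdt tags arc_tags (i, Sw, St, Sl) w = (i, Sw, St, Sl) := by
        unfold innerStepA
        rw [if_neg (by intro h; exact hf h.1)]
      have hfP : firesP buffer elem w = false := by
        unfold firesP; exact beq_eq_false_iff_ne.mpr hf
      rw [hstep, ih i hi]
      simp [hfP]

-- A's number of firing words = count of buffer[elem] if elem is a first-occurrence index, else 0
theorem countP_fires (buffer : List String) (elem : Int) :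
    buffer.countP (firesP buffer elem) =
      (if 0 ≤ elem ∧ elem < (buffer.length : Int) ∧
          PySem.List.index? buffer (PySem.List.pyGetD buffer elem "") = some elem.toNat
       then buffer.count (PySem.List.pyGetD buffer elem "") else 0) := by
  by_cases h : 0 ≤ elem ∧ elem < (buffer.length : Int) ∧
      PySem.List.index? buffer (PySem.List.pyGetD buffer elem "") = some elem.toNat
  · rw [if_pos h]
    obtain ⟨h0, hlen, hidx⟩ := h
    rw [List.count_eq_countP]
    apply List.countP_congr
    intro w hw
    simp only [firesP, beq_iff_eq]
    constructor
    · intro hp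
      obtain ⟨m, hm⟩ := Option.isSome_iff_exists.mp ((PySem.List.index?_isSome_iff _ _).mpr hw)
      rw [hm] at hp
      simp at hp
      have hme : m = elem.toNat := by omega
      subst hme
      obtain ⟨hk, hkv, _⟩ := PySem.List.getElem_of_index?_eq_some hm
      obtain ⟨hk2, hkv2, _⟩ := PySem.List.getElem_of_index?_eq_some hidx
      rw [← hkv, ← hkv2]
    · intro hp
      subst hp
      rw [hidx]
      simp
      omega
  · rw [if_neg h]
    rw [List.countP_eq_zero]
    intro w hw
    simp only [firesP, beq_iff_eq]
    intro hp
    obtain ⟨m, hm⟩ := Option.isSome_iff_exists.mp ((PySem.List.index?_isSome_iff _ _).mpr hw)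
    rw [hm] at hp
    simp at hp
    obtain ⟨hk, hkv, _⟩ := PySem.List.getElem_of_index?_eq_some hm
    apply h
    subst hp
    refine ⟨by omega, by omega, ?_⟩
    rw [PySem.List.pyGetD_natCast]
    rw [List.getD_eq_getElem buffer "" hk]
    simp only [Int.toNat_natCast]
    rw [hkv, hm]

-- A's `for missing in range(i*2, 4)` loop appends 4 - 2*i NULLs to each list
theorem padA (k : Nat) (hk : k ≤ 2) (t : List String × List String × List String) :
    (PySem.List.pyRange ((k : Int) * 2) 4 1).foldl
      (fun t _ => (t.1 ++ ["NULL"], t.2.1 ++ ["NULL"], t.2.2 ++ ["NULL"])) t =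
      (t.1 ++ List.replicate (4 - 2 * k) "NULL", t.2.1 ++ List.replicate (4 - 2 * k) "NULL",
       t.2.2 ++ List.replicate (4 - 2 * k) "NULL") := by
  interval_cases k
  · have h : PySem.List.pyRange (((0 : Nat) : Int) * 2) 4 1 = [0, 1, 2, 3] := by decide
    rw [h]
    simp [List.foldl, List.replicate, List.append_assoc]
  · have h : PySem.List.pyRange (((1 : Nat) : Int) * 2) 4 1 = [2, 3] := by decide
    rw [h]
    simp [List.foldl, List.replicate, List.append_assoc]
  · have h : PySem.List.pyRange (((2 : Nat) : Int) * 2) 4 1 = [] := by decide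
    rw [h]
    simp [List.foldl]

-- the two per-elem loop bodies agree on every state and elem
theorem elemStep_eq (buffer : List String) (pdt : List Int) (tags arc_tags : List String)
    (s : List String × List String × List String) (elem : Int) :
    elemStepA buffer pdt tags arc_tags s elem =
      elemStepB buffer tags arc_tags (firstIdxDict buffer) (cntDict buffer)
        (firstIdxDict pdt) (lastIdxDict pdt) s elem := by
  unfold elemStepA elemStepB
  rw [innerLoopA elem buffer pdt tags arc_tags buffer 0 (by omega) s.1 s.2.1 s.2.2]
  simp only [Nat.zero_add, Nat.sub_zero]
  -- identify B's k with A's capped count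
  have hk : (if 0 ≤ elem ∧ elem < (buffer.length : Int) ∧
        (firstIdxDict buffer).get? (PySem.List.pyGetD buffer elem "") = some elem then
      min 2 ((cntDict buffer).getD (PySem.List.pyGetD buffer elem "") 0).toNat
    else 0) = min 2 (buffer.countP (firesP buffer elem)) := by
    rw [firstIdxDict_get?, cntDict_getD, countP_fires]
    by_cases hc : 0 ≤ elem ∧ elem < (buffer.length : Int) ∧
        PySem.List.index? buffer (PySem.List.pyGetD buffer elem "") = some elem.toNat
    · rw [if_pos hc, if_pos]
      · simp
      · refine ⟨hc.1, hc.2.1, ?_⟩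
        rw [hc.2.2]
        simp
        omega
    · rw [if_neg hc, if_neg]
      · simp
      · intro hb
        apply hc
        refine ⟨hb.1, hb.2.1, ?_⟩
        have := hb.2.2
        cases hix : PySem.List.index? buffer (PySem.List.pyGetD buffer elem "") with
        | none => rw [hix] at this; simp at this
        | some m =>
          rw [hix] at this
          simp at this
          exact congrArg some (by omega)
  rw [hk]
  set c := buffer.countP (firesP buffer elem) with hc
  -- features
  rw [firstIdxDict_get? pdt elem, lastIdxDict_get? pdt elem]
  by_cases hz : min 2 c = 0
  · rw [hz]
    rw [padA 0 (by omega)]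
    simp
  · -- min 2 c ≥ 1
    cases hpd : PySem.List.index? pdt elem with
    | none =>
      have hpd' : List.idxOf? elem pdt = none := by
        rw [← PySem.List.index?_eq_idxOf?]; exact hpd
      have hblkW : blkW elem pdt buffer = ["NULL", "NULL"] := by
        simp [blkW, getChildrenA, hpd']
      have hblkT : ∀ ts, blkT elem pdt buffer ts = ["NULL", "NULL"] := by
        intro ts; simp [blkT, getChildrenA, hpd']
      rw [hblkW, hblkT, hblkT]
      simp only [Option.bind_eq_bind, Option.bind_none, Option.map_none]
      rw [if_pos hz]
      rw [padA (min 2 c) (by omega)]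
    | some l0 =>
      have hpd' : List.idxOf? elem pdt = some l0 := by
        rw [← PySem.List.index?_eq_idxOf?]; exact hpd
      have hmem : elem ∈ pdt := by
        rw [← PySem.List.index?_isSome_iff pdt elem]; rw [hpd]; rfl
      have hmemr : elem ∈ pdt.reverse := by simpa using hmem
      obtain ⟨rr, hrr⟩ := Option.isSome_iff_exists.mp ((PySem.List.index?_isSome_iff _ _).mpr hmemr)
      have hrr' : List.idxOf? elem pdt.reverse = some rr := by
        rw [← PySem.List.index?_eq_idxOf?]; exact hrr
      rw [if_pos hz]
      rw [padA (min 2 c) (by omega)]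
      by_cases hl : (l0 : Int) = elem <;>
        by_cases hr : ((pdt.length : Int) - (rr : Int) - 1) = elem <;>
        simp [blkW, blkT, getChildrenA, hpd', hrr', hl, hr]

-- the two programs agree
theorem main_eq (x : List Int) (buffer : List String) (pdt : List Int) (tags arc_tags : List String) :
    first_two_children x buffer pdt tags arc_tags = first_two_children_alt x buffer pdt tags arc_tags := by
  unfold first_two_children first_two_children_alt
  exact PySem.List.foldl_congr_mem x _ _ _ (fun acc e _ => elemStep_eq buffer pdt tags arc_tags acc e)

-- ===== VERDICT (by name: the statement is the Claim_ definition above) =====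
theorem first_two_children_spec : Claim_equal_first_two_children := by
  intro x buffer pdt tags arc_tags _dom _pre
  unfold Spec_first_two_children
  exact main_eq x buffer pdt tags arc_tags
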